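-- pv_equiv track=rewrite | github.com/jzelAdmin2006/M426-dartcalc | python/dartcalc/score.py | calc
-- ===== SOURCE A (Python) =====
-- def calc(a):
--     # set b to zero
--     b = 0
--     # enumerate the result of splitting a
--     for c, d in enumerate(a.split()):
--         # if c is zero...
--         if c == 0:
--             f = int(d)
--         else:
--             # otherwise, if it is one...
--             if c == 1:
--                 b = b + f * int(d)
--             else:
--                 # or maybe, if it is two...
--                 if c == 2:
--                     f = int(d)
--                 else:
--                     # another case: c is three
--                     if c == 3:
--                         b = b + f * int(d)
--                     else:
--                         # and if c is four...
--                         if c == 4: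
--                             f = int(d)
--                         else:
--                             # or even if c is five...
--                             if c == 5:
--                                 # do the calculation
--                                 b = b + f * int(d)
--     # return b
--     return b
-- ===== SOURCE B (Python) =====
-- def calc(a):
--     vals = [int(t) for t in a.split()[:6]]
--     return sum(x * y for x, y in zip(vals[0::2], vals[1::2]))
-- ===== Notes on version B (the rewrite author's own statement) =====
-- stated objective: idiomatic
-- what changed: Replaces the six-way index-switch loop carrying (b, f) state with an up-front int-parse of the slice-capped token list and a dot product of its even/odd strided slices via zip.
import Mathlib
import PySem

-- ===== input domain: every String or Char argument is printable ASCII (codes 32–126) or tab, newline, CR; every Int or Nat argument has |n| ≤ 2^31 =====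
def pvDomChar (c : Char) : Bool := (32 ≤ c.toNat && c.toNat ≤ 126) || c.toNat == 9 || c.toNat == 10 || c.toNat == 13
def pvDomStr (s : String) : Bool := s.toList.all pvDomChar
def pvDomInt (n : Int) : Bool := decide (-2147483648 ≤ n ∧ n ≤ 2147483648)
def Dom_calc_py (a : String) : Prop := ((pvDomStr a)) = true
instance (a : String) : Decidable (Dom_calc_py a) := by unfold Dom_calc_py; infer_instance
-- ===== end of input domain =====

-- B parses the first six tokens to ints up front and sums the dot product of the even/odd
-- strided slices, replacing A's six-way index-switch loop (objective: idiomatic; same cost).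

-- ===== PORT A =====
-- loop body of A; state = some (b, f), none = ValueError already raised by int(d)
def calcStep (st : Option (Int × Int)) (cd : Int × String) : Option (Int × Int) :=
  match st with
  | none => none
  | some (b, f) =>
    if cd.1 == 0 then (PySem.Int.ofStr? cd.2).map (fun v => (b, v))
    else if cd.1 == 1 then (PySem.Int.ofStr? cd.2).map (fun v => (b + f * v, f))
    else if cd.1 == 2 then (PySem.Int.ofStr? cd.2).map (fun v => (b, v))
    else if cd.1 == 3 then (PySem.Int.ofStr? cd.2).map (fun v => (b + f * v, f))
    else if cd.1 == 4 then (PySem.Int.ofStr? cd.2).map (fun v => (b, v))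
    else if cd.1 == 5 then (PySem.Int.ofStr? cd.2).map (fun v => (b + f * v, f))
    else some (b, f)

def calc_py (a : String) : Int :=
  ((((PySem.List.enumerate (PySem.Str.split₀ a) 0).foldl calcStep (some (0, 0))).map (·.1)).getD 0)

-- ===== PORT B =====
def calc_py_alt (a : String) : Int :=
  let vals := ((PySem.List.slice (PySem.Str.split₀ a) none (some 6)).mapM PySem.Int.ofStr?).getD []
      -- [int(t) for t in a.split()[:6]]
  let evens := (PySem.List.slice? vals none none 2).getD []             -- vals[0::2]
  let odds := (PySem.List.slice? vals (some 1) none 2).getD []          -- vals[1::2]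
  ((evens.zip odds).map (fun p => p.1 * p.2)).sum

-- ===== PRECONDITION & SPEC =====
-- Pre_ excludes exactly the inputs where A raises ValueError: some of the first
-- min(6, len) whitespace-separated tokens does not parse as a Python int.
def Pre_calc_py (a : String) : Prop :=
  ∀ t ∈ (PySem.Str.split₀ a).take 6, (PySem.Int.ofStr? t).isSome = true
instance (a : String) : Decidable (Pre_calc_py a) := by unfold Pre_calc_py; infer_instance
def pvWitness_calc_py : String := "1 2 3 4 5 6"

def Spec_calc_py (a : String) (out : Int) : Prop := out = calc_py_alt a
instance (a : String) (out : Int) : Decidable (Spec_calc_py a out) := by unfold Spec_calc_py; infer_instance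

-- ===== CLAIM (what is proved, stated in full; the proofs are below) =====
def Claim_equal_calc_py : Prop := ∀ (a : String), Dom_calc_py a → Pre_calc_py a → Spec_calc_py a (calc_py a)

-- ===== LEMMAS AND PROOFS =====

-- indices ≥ 6 leave A's loop state unchanged
lemma foldl_calcStep_high (l : List (Int × String)) (st : Option (Int × Int))
    (h : ∀ p ∈ l, 6 ≤ p.1) : l.foldl calcStep st = st := by
  induction l generalizing st with
  | nil => rfl
  | cons p l ih =>
    have h6 : 6 ≤ p.1 := h p (by simp)
    have hstep : calcStep st p = st := by
      match st with
      | none => rfl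
      | some (b, f) =>
        simp only [calcStep]
        have : ¬ (p.1 == 0) ∧ ¬ (p.1 == 1) ∧ ¬ (p.1 == 2) ∧ ¬ (p.1 == 3) ∧ ¬ (p.1 == 4) ∧ ¬ (p.1 == 5) := by
          refine ⟨?_, ?_, ?_, ?_, ?_, ?_⟩ <;> simp <;> omega
        simp [this.1, this.2.1, this.2.2.1, this.2.2.2.1, this.2.2.2.2.1, this.2.2.2.2.2]
    rw [List.foldl_cons, hstep]
    exact ih st (fun q hq => h q (by simp [hq]))

-- A's fold over all tokens equals the fold over the first six
lemma calc_py_take6 (ts : List String) :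
    (PySem.List.enumerate ts 0).foldl calcStep (some (0, 0)) =
    (PySem.List.enumerate (ts.take 6) 0).foldl calcStep (some (0, 0)) := by
  conv_lhs => rw [← List.take_append_drop 6 ts]
  rw [PySem.List.enumerate_append, List.foldl_append]
  apply foldl_calcStep_high
  intro p hp
  rcases (PySem.List.mem_enumerate_iff _ _ _).1 hp with ⟨k, hk, rfl⟩
  have : (ts.take 6).length = min 6 ts.length := List.length_take ..
  have hd : ts.drop 6 ≠ [] := by intro hnil; rw [hnil] at hk; simp at hk
  have h6 : 6 ≤ ts.length := by
    by_contra hlt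
    exact hd (List.drop_eq_nil_of_le (by omega))
  simp only [this]
  omega

-- ===== VERDICT (by name: the statement is the Claim_ definition above) =====
theorem calc_py_spec : Claim_equal_calc_py := by
  intro a _ hpre
  unfold Pre_calc_py at hpre
  unfold Spec_calc_py calc_py calc_py_alt
  rw [calc_py_take6]
  have hsl : PySem.List.slice (PySem.Str.split₀ a) none (some 6) = (PySem.Str.split₀ a).take 6 := by
    have := PySem.List.slice_to (PySem.Str.split₀ a) (b := 6) (by norm_num)
    simpa using this
  rw [hsl]
  generalize hts : (PySem.Str.split₀ a).take 6 = t at hpre ⊢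
  have hlen : t.length ≤ 6 := by rw [← hts]; exact List.length_take_le 6 _
  match t with
  | [] => rfl
  | [t0] =>
    obtain ⟨v0, h0⟩ := Option.isSome_iff_exists.1 (hpre t0 (by simp))
    simp [PySem.List.enumerate_cons, PySem.List.enumerate_nil, calcStep,
      List.mapM_cons, List.mapM_nil, PySem.List.slice?, PySem.List.sliceIndices, List.range_succ, h0]
  | [t0, t1] =>
    obtain ⟨v0, h0⟩ := Option.isSome_iff_exists.1 (hpre t0 (by simp))
    obtain ⟨v1, h1⟩ := Option.isSome_iff_exists.1 (hpre t1 (by simp))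
    simp [PySem.List.enumerate_cons, PySem.List.enumerate_nil, calcStep,
      List.mapM_cons, List.mapM_nil, PySem.List.slice?, PySem.List.sliceIndices, List.range_succ, h0, h1]
  | [t0, t1, t2] =>
    obtain ⟨v0, h0⟩ := Option.isSome_iff_exists.1 (hpre t0 (by simp))
    obtain ⟨v1, h1⟩ := Option.isSome_iff_exists.1 (hpre t1 (by simp))
    obtain ⟨v2, h2⟩ := Option.isSome_iff_exists.1 (hpre t2 (by simp))
    simp [PySem.List.enumerate_cons, PySem.List.enumerate_nil, calcStep,
      List.mapM_cons, List.mapM_nil, PySem.List.slice?, PySem.List.sliceIndices, List.range_succ, h0, h1, h2]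
  | [t0, t1, t2, t3] =>
    obtain ⟨v0, h0⟩ := Option.isSome_iff_exists.1 (hpre t0 (by simp))
    obtain ⟨v1, h1⟩ := Option.isSome_iff_exists.1 (hpre t1 (by simp))
    obtain ⟨v2, h2⟩ := Option.isSome_iff_exists.1 (hpre t2 (by simp))
    obtain ⟨v3, h3⟩ := Option.isSome_iff_exists.1 (hpre t3 (by simp))
    simp [PySem.List.enumerate_cons, PySem.List.enumerate_nil, calcStep,
      List.mapM_cons, List.mapM_nil, PySem.List.slice?, PySem.List.sliceIndices, List.range_succ, h0, h1, h2, h3]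
  | [t0, t1, t2, t3, t4] =>
    obtain ⟨v0, h0⟩ := Option.isSome_iff_exists.1 (hpre t0 (by simp))
    obtain ⟨v1, h1⟩ := Option.isSome_iff_exists.1 (hpre t1 (by simp))
    obtain ⟨v2, h2⟩ := Option.isSome_iff_exists.1 (hpre t2 (by simp))
    obtain ⟨v3, h3⟩ := Option.isSome_iff_exists.1 (hpre t3 (by simp))
    obtain ⟨v4, h4⟩ := Option.isSome_iff_exists.1 (hpre t4 (by simp))
    simp [PySem.List.enumerate_cons, PySem.List.enumerate_nil, calcStep,
      List.mapM_cons, List.mapM_nil, PySem.List.slice?, PySem.List.sliceIndices, List.range_succ, h0, h1, h2, h3, h4]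
  | [t0, t1, t2, t3, t4, t5] =>
    obtain ⟨v0, h0⟩ := Option.isSome_iff_exists.1 (hpre t0 (by simp))
    obtain ⟨v1, h1⟩ := Option.isSome_iff_exists.1 (hpre t1 (by simp))
    obtain ⟨v2, h2⟩ := Option.isSome_iff_exists.1 (hpre t2 (by simp))
    obtain ⟨v3, h3⟩ := Option.isSome_iff_exists.1 (hpre t3 (by simp))
    obtain ⟨v4, h4⟩ := Option.isSome_iff_exists.1 (hpre t4 (by simp))
    obtain ⟨v5, h5⟩ := Option.isSome_iff_exists.1 (hpre t5 (by simp))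
    simp [PySem.List.enumerate_cons, PySem.List.enumerate_nil, calcStep,
      List.mapM_cons, List.mapM_nil, PySem.List.slice?, PySem.List.sliceIndices, List.range_succ, h0, h1, h2, h3, h4, h5]
    ring
  | t0 :: t1 :: t2 :: t3 :: t4 :: t5 :: t6 :: rest =>
    simp at hlen
    omega
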